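-- pv_equiv track=rewrite | github.com/VaHiX/CodeForces | Python/ByRound/2097/2097_A_Sports_Betting.py | solve
-- ===== SOURCE A (Python) =====
-- def solve(a):
--     a.sort()  # Sort the days in ascending order
--     a.append(-1)  # Add sentinel to simplify loop logic
--     px = -1  # Previous day processed
--     k = 1  # Count of consecutive same days
--     det = False  # Flag indicating if we have enough duplicates to cover all cases
--
--     for i in range(len(a) - 1):
--         if a[i] == a[i + 1]:
--             k += 1  # Increment count for same day
--             continue
--
--         # If current day is greater than previous day + 1, it's a gap
--         if a[i] > px + 1:
--             det = False  # Reset flag when there is a gap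
--
--         # Check if we can guarantee at least one win:
--         # - If there are at least 4 occurrences of the same day (always possible to get 2 consecutive wins)
--         # - Or, if we can use 2 or more duplicate days with previous pattern matched
--         if k >= 4 or (k >= 2 and det):
--             return "Yes"
--
--         # Update flag for future comparisons based on current group size
--         det = det or (k >= 2)
--         px = a[i]  # Update previous day
--         k = 1  # Reset count for next group
--
--     return "No"
-- ===== SOURCE B (Python) =====
-- def solve(a):
--     a.sort()  # keep A's observable in-place sort (A additionally appends a -1 sentinel; return value is what is compared)
--     cnt = {}
--     for d in a:
--         cnt[d] = cnt.get(d, 0) + 1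
--     if any(c >= 4 for c in cnt.values()):
--         return "Yes"
--     dups = [d for d, c in cnt.items() if c >= 2]  # ascending, since a is sorted
--     for d1, d2 in zip(dups, dups[1:]):
--         # every day strictly between d1 and d2 is present iff the distinct-day count equals the gap size
--         if sum(1 for x in cnt if d1 < x < d2) == d2 - d1 - 1:
--             return "Yes"
--     return "No"
-- ===== Notes on version B (the rewrite author's own statement) =====
-- stated objective: alternative
-- what changed: A is a streaming automaton over the sorted list with a -1 sentinel, run-length counter k and a gap-reset flag det; B drops the scan-with-state entirely and decides by a declarative criterion: some day occurs >= 4 times, or some adjacent pair of duplicate days d1 < d2 has exactly d2-d1-1 distinct days strictly between them (i.e. the interval is fully covered).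
-- outside the precondition, e.g. on solve([-1, -1, -1, -1]): A returns 'No', B returns 'Yes'
import Mathlib
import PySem

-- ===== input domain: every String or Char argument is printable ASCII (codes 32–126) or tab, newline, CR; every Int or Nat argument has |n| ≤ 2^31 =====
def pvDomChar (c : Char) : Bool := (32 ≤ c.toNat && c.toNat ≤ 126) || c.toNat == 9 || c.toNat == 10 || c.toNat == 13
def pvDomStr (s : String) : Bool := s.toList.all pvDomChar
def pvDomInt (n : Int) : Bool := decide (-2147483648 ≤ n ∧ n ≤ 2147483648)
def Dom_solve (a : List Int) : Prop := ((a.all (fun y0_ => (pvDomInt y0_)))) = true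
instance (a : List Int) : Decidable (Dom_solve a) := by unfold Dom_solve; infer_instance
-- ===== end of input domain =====

-- B replaces A's sentinel-scan automaton (run counter k, gap-reset flag det) by a declarative
-- criterion over a frequency table: a day with >= 4 occurrences, or an adjacent pair of duplicate
-- days whose open interval contains exactly d2-d1-1 distinct days. Equivalence is about the RETURN
-- value (both sort the argument in place; A additionally appends a -1 sentinel to it).

-- ===== PORT A =====
-- A's for-loop over i in range(len(a)-1) comparing a[i] with a[i+1]: ported as structural recursion
-- over adjacent pairs of the list (state px, k, det as in A; the final single element is never a[i]).
def solveLoopA : List Int → Int → Int → Bool → String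
  | x :: y :: rest, px, k, det =>
    if x = y then solveLoopA (y :: rest) px (k + 1) det
    else
      let det2 := if x > px + 1 then false else det
      if k ≥ 4 ∨ (k ≥ 2 ∧ det2 = true) then "Yes"
      else solveLoopA (y :: rest) x 1 (det2 || decide (k ≥ 2))
  | _, _, _, _ => "No"

def solve (a : List Int) : String :=
  solveLoopA (PySem.List.sorted a (fun x => x) ++ [-1]) (-1) 1 false

-- ===== PORT B =====
-- Source B's final for-loop over zip(dups, dups[1:]) with its early return.
def pairLoop (keys : List Int) : List (Int × Int) → String
  | [] => "No"
  | (d1, d2) :: rest =>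
    if ((keys.filter (fun x => decide (d1 < x ∧ x < d2))).length : Int) = d2 - d1 - 1 then "Yes"
    else pairLoop keys rest

def solve_alt (a : List Int) : String :=
  let s := PySem.List.sorted a (fun x => x)
  let cnt := s.foldl (fun d x => d.insert x (d.getD x 0 + 1))
    (PySem.Dict.empty : PySem.Dict Int Int)
  if cnt.values.any (fun c => decide (c ≥ 4)) then "Yes"
  else
    let dups := (cnt.items.filter (fun p => decide (p.2 ≥ 2))).map Prod.fst
    pairLoop cnt.keys (dups.zip dups.tail)

-- ===== PRECONDITION & SPEC =====
-- Pre_ excludes lists whose maximum element is -1 (all days ≤ -1 with -1 present): -1 is A's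
-- end-of-list sentinel, and on such lists the sentinel merges with the trailing run of real -1 days,
-- so that run is silently never checked — an artefact outside the problem's natural domain of
-- positive day numbers.
def Pre_solve (a : List Int) : Prop := (-1 : Int) ∈ a → ∃ y ∈ a, (-1 : Int) < y
instance (a : List Int) : Decidable (Pre_solve a) := by unfold Pre_solve; infer_instance
def pvWitness_solve : List Int := [1, 1, 3]

def Spec_solve (a : List Int) (out : String) : Prop := out = solve_alt a
instance (a : List Int) (out : String) : Decidable (Spec_solve a out) := by unfold Spec_solve; infer_instance

-- ===== CLAIM (what is proved, stated in full; the proofs are below) =====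
def Claim_equal_solve : Prop := ∀ (a : List Int), Dom_solve a → Pre_solve a → Spec_solve a (solve a)

-- ===== LEMMAS AND PROOFS =====

-- Stage 1 (proof-only helper): A's loop collapsed to a scan over the distinct (day, count) items.
def scanItems : List (Int × Int) → Int → Bool → String
  | [], _, _ => "No"
  | (d, c) :: rest, px, det =>
    let det2 := if d ≠ px + 1 then false else det
    if c ≥ 4 ∨ (c ≥ 2 ∧ det2 = true) then "Yes"
    else scanItems rest d (det2 || decide (c ≥ 2))

-- A's loop consumes one maximal run of equal elements: k accumulates the run length.
lemma solveLoopA_run (m : Nat) (x z : Int) (t : List Int) (px k : Int) (det : Bool)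
    (hzx : z ≠ x) :
    solveLoopA (List.replicate (m + 1) x ++ z :: t) px k det =
      (if k + m ≥ 4 ∨ (k + m ≥ 2 ∧ (if x > px + 1 then false else det) = true) then "Yes"
       else solveLoopA (z :: t) x 1
         ((if x > px + 1 then false else det) || decide (k + m ≥ 2))) := by
  induction m generalizing k with
  | zero =>
      simp only [List.replicate, List.cons_append, List.nil_append, solveLoopA]
      rw [if_neg (by exact fun h => hzx h.symm)]
      norm_num
  | succ m ih =>
      have : List.replicate (m + 1 + 1) x ++ z :: t = x :: (List.replicate (m + 1) x ++ z :: t) := by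
        simp [List.replicate_succ]
      rw [this]
      have hcons : ∃ w rest, List.replicate (m + 1) x ++ z :: t = w :: rest ∧ w = x := by
        refine ⟨x, List.replicate m x ++ z :: t, ?_, rfl⟩
        simp [List.replicate_succ]
      obtain ⟨w, rest, hwr, hw⟩ := hcons
      rw [hwr, solveLoopA, if_pos hw.symm, ← hwr, ih (k + 1)]
      have h1 : k + 1 + (m : Int) = k + ((m : Nat) + 1 : Nat) := by push_cast; ring
      rw [h1]

-- peeling the leading maximal run off a sorted list
lemma peel (s' : List Int) (x : Int) (hs : List.Pairwise (· ≤ ·) (x :: s')) :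
    ∃ (m : Nat) (rest : List Int), x :: s' = List.replicate (m + 1) x ++ rest ∧
      List.Pairwise (· ≤ ·) rest ∧ ∀ y ∈ rest, x < y := by
  induction s' with
  | nil => exact ⟨0, [], by simp, List.Pairwise.nil, by simp⟩
  | cons y t ih =>
      by_cases hxy : y = x
      · subst hxy
        have hs' : List.Pairwise (· ≤ ·) (y :: t) := hs.of_cons
        obtain ⟨m, rest, heq, hrest, hgt⟩ := ih hs'
        exact ⟨m + 1, rest, by rw [List.replicate_succ, List.cons_append, ← heq], hrest, hgt⟩
      · refine ⟨0, y :: t, by simp, hs.of_cons, ?_⟩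
        intro z hz
        have hxy' : x < y :=
          lt_of_le_of_ne ((List.pairwise_cons.mp hs).1 y (by simp)) (fun h => hxy h.symm)
        rcases List.mem_cons.mp hz with rfl | hz'
        · exact hxy'
        · exact lt_of_lt_of_le hxy' ((List.pairwise_cons.mp hs.of_cons).1 z hz')

lemma ofList_replicate_append (m : Nat) (x : Int) (rest : List Int) (hx : x ∉ rest) :
    PySem.Set.ofList (List.replicate (m + 1) x ++ rest) = x :: PySem.Set.ofList rest := by
  induction m with
  | zero =>
      simp only [List.replicate, List.cons_append, List.nil_append, PySem.Set.ofList_cons]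
      congr 1
      unfold PySem.Set.discard
      refine List.filter_eq_self.mpr ?_
      intro y hy
      have hyr : y ∈ rest := (PySem.Set.mem_ofList _ _).mp hy
      have hne : y ≠ x := fun h => hx (h ▸ hyr)
      simp [hne]
  | succ m ih =>
      have : List.replicate (m + 1 + 1) x ++ rest = x :: (List.replicate (m + 1) x ++ rest) := by
        simp [List.replicate_succ]
      rw [this, PySem.Set.ofList_cons, ih]
      congr 1
      unfold PySem.Set.discard
      rw [List.filter_cons_of_neg (by simp)]
      refine List.filter_eq_self.mpr ?_
      intro y hy
      have hyr : y ∈ rest := (PySem.Set.mem_ofList _ _).mp hy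
      have hne : y ≠ x := fun h => hx (h ▸ hyr)
      simp [hne]

lemma scanItems_cons (d c : Int) (rest : List (Int × Int)) (px : Int) (det : Bool) :
    scanItems ((d, c) :: rest) px det =
      (if c ≥ 4 ∨ (c ≥ 2 ∧ (if d ≠ px + 1 then false else det) = true) then "Yes"
       else scanItems rest d ((if d ≠ px + 1 then false else det) || decide (c ≥ 2))) := rfl

-- Stage 1: A's loop on a sorted list (last element ≠ -1) equals the scan over distinct items.
lemma main_loop : ∀ (n : Nat) (s : List Int), s.length ≤ n →
    List.Pairwise (· ≤ ·) s → s.getLast? ≠ some (-1) →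
    ∀ (px : Int) (det : Bool), (det = false ∨ ∀ x ∈ s, px + 1 ≤ x) →
    solveLoopA (s ++ [-1]) px 1 det =
      scanItems ((PySem.Set.ofList s).map (fun k => (k, (s.count k : Int)))) px det := by
  intro n
  induction n with
  | zero =>
      intro s hlen _ _ px det _
      have : s = [] := List.eq_nil_of_length_eq_zero (Nat.le_zero.mp hlen)
      subst this
      simp [solveLoopA, scanItems, PySem.Set.ofList]
  | succ n ih =>
      intro s hlen hsort hlast px det hdet
      match s with
      | [] => simp [solveLoopA, scanItems, PySem.Set.ofList]
      | x :: s' =>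
        obtain ⟨m, rest, heq, hrsort, hgt⟩ := peel s' x hsort
        have hxrest : x ∉ rest := fun h => lt_irrefl x (hgt x h)
        have hdet2 : (if x > px + 1 then false else det) = (if x ≠ px + 1 then false else det) := by
          rcases hdet with h | h
          · subst h; simp
          · have hx : px + 1 ≤ x := h x (by simp)
            by_cases hgt' : x > px + 1
            · rw [if_pos hgt', if_pos (by omega)]
            · rw [if_neg hgt', if_neg (by omega)]
        have hcount : (x :: s').count x = m + 1 := by
          rw [heq, List.count_append]
          simp [List.count_eq_zero.mpr hxrest]
        have hofl : PySem.Set.ofList (x :: s') = x :: PySem.Set.ofList rest := by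
          rw [heq]; exact ofList_replicate_append m x rest hxrest
        have hmapTail : (PySem.Set.ofList rest).map (fun k => (k, ((x :: s').count k : Int))) =
            (PySem.Set.ofList rest).map (fun k => (k, (rest.count k : Int))) := by
          refine List.map_congr_left ?_
          intro k hk
          have hkrest : k ∈ rest := (PySem.Set.mem_ofList _ _).mp hk
          have hkx : k ≠ x := fun h => lt_irrefl x (h ▸ hgt k hkrest)
          rw [heq, List.count_append]
          simp [List.count_replicate, hkx.symm]
        have hm : (1 : Int) + (m : Int) = ((m + 1 : Nat) : Int) := by push_cast; ring
        match rest, heq with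
        | [], heq =>
          have hxne : x ≠ -1 := by
            intro hx1
            apply hlast
            rw [heq, hx1, List.append_nil, List.replicate_succ']
            exact List.getLast?_concat
          have hA := solveLoopA_run m x (-1) [] px 1 det (fun h => hxne h.symm)
          rw [List.append_nil] at heq
          rw [hofl, List.map_cons, hcount]
          have heqL : (x :: s') ++ [-1] = List.replicate (m + 1) x ++ (-1) :: ([] : List Int) := by
            simp [heq]
          rw [heqL, hA, scanItems_cons, hdet2, hm]
          by_cases hC : (((m + 1 : Nat) : Int) ≥ 4 ∨ (((m + 1 : Nat) : Int) ≥ 2 ∧ (if x ≠ px + 1 then false else det) = true))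
          · simp only [if_pos hC]
          · simp only [if_neg hC]
            simp [solveLoopA, scanItems, PySem.Set.ofList]
        | z :: t, heq =>
          have hzx : z ≠ x := fun h => lt_irrefl x (h ▸ hgt z (by simp))
          have hA := solveLoopA_run m x z (t ++ [-1]) px 1 det hzx
          have heq' : (x :: s') ++ [-1] = List.replicate (m + 1) x ++ z :: (t ++ [-1]) := by
            simp [heq]
          rw [heq', hA, hofl, List.map_cons, hcount, hmapTail, scanItems_cons, hdet2, hm]
          have hlen' : (z :: t).length ≤ n := by
            have := congrArg List.length heq
            simp [List.length_replicate] at this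
            simp at hlen ⊢
            omega
          have hlast' : (z :: t).getLast? ≠ some (-1) := by
            intro h
            apply hlast
            rw [heq, List.getLast?_append_of_ne_nil _ (by simp)]
            exact h
          by_cases hC : (((m + 1 : Nat) : Int) ≥ 4 ∨ (((m + 1 : Nat) : Int) ≥ 2 ∧ (if x ≠ px + 1 then false else det) = true))
          · simp only [if_pos hC]
          · simp only [if_neg hC]
            exact ih (z :: t) hlen' hrsort hlast' x _ (Or.inr (fun y hy => hgt y hy))

-- Stage 2: boolean characterisation of the scan.
def any4 (L : List (Int × Int)) : Bool := L.any (fun p => decide (p.2 ≥ 4))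

def chainFrom (d : Int) : List (Int × Int) → Bool
  | [] => false
  | (e, c) :: rest => decide (e = d + 1) && (decide (c ≥ 2) || chainFrom e rest)

def chainDup : List (Int × Int) → Bool
  | [] => false
  | (d, c) :: rest => (decide (c ≥ 2) && chainFrom d rest) || chainDup rest

lemma scan_char : ∀ (L : List (Int × Int)) (px : Int) (det : Bool),
    scanItems L px det =
      (if ((det && chainFrom px L) || any4 L || chainDup L) = true then "Yes" else "No") := by
  intro L
  induction L with
  | nil => intro px det; simp [scanItems, chainFrom, any4, chainDup]
  | cons p rest ih =>
      intro px det
      obtain ⟨d, c⟩ := p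
      have hdet2 : (if d ≠ px + 1 then false else det) = (det && decide (d = px + 1)) := by
        by_cases hd : d = px + 1
        · simp [hd]
        · simp [hd]
      have hcf : chainFrom px ((d, c) :: rest) =
          (decide (d = px + 1) && (decide (c ≥ 2) || chainFrom d rest)) := rfl
      have ha4 : any4 ((d, c) :: rest) = (decide (c ≥ 4) || any4 rest) := rfl
      have hcd : chainDup ((d, c) :: rest) =
          ((decide (c ≥ 2) && chainFrom d rest) || chainDup rest) := rfl
      rw [scanItems_cons, hdet2, ih, hcf, ha4, hcd]
      by_cases h4 : c ≥ 4 <;> by_cases h2 : c ≥ 2 <;> by_cases hd : d = px + 1 <;>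
        cases det <;> cases hcf2 : chainFrom d rest <;>
        simp [h4, h2, hd]

-- Stage 3: chainDup equals B's adjacent-duplicate-pair interval-count criterion.
lemma nodup_filter_interval_le (K : List Int) (hK : K.Nodup) (a b : Int) (hab : a < b) :
    ((K.filter (fun x => decide (a < x ∧ x < b))).length : Int) ≤ b - a - 1 := by
  have hnd : (K.filter (fun x => decide (a < x ∧ x < b))).Nodup := hK.filter _
  have hcard : (K.filter (fun x => decide (a < x ∧ x < b))).toFinset.card =
      (K.filter (fun x => decide (a < x ∧ x < b))).length := List.toFinset_card_of_nodup hnd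
  have hsub : (K.filter (fun x => decide (a < x ∧ x < b))).toFinset ⊆ Finset.Ioo a b := by
    intro x hx
    have := List.of_mem_filter (List.mem_toFinset.mp hx)
    simp at this
    simpa [Finset.mem_Ioo] using this
  have hle := Finset.card_le_card hsub
  rw [hcard, Int.card_Ioo] at hle
  have := Int.toNat_le.mp (le_refl (b - a - 1).toNat)
  omega

-- elements known to lie outside the open interval do not affect the interval filter
lemma filter_interval_drop (P M : List Int) (a b : Int) (hP : ∀ x ∈ P, ¬(a < x ∧ x < b)) :
    (P ++ M).filter (fun x => decide (a < x ∧ x < b)) =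
      M.filter (fun x => decide (a < x ∧ x < b)) := by
  rw [List.filter_append, List.filter_eq_nil_iff.mpr, List.nil_append]
  intro x hx
  simpa using hP x hx

lemma chainFrom_pred (P : List Int) (d : Int) (rest : List (Int × Int))
    (hP : ∀ x ∈ P, x < d) (hinc : List.Pairwise (· < ·) (d :: rest.map Prod.fst)) :
    chainFrom d rest =
      (match (rest.filter (fun p => decide (p.2 ≥ 2))).map Prod.fst with
       | [] => false
       | D :: _ =>
         decide ((((P ++ d :: rest.map Prod.fst).filter
             (fun x => decide (d < x ∧ x < D))).length : Int) = D - d - 1)) := by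
  induction rest generalizing P d with
  | nil => rfl
  | cons p rest' ih =>
      obtain ⟨e, ce⟩ := p
      have hde : d < e := (List.pairwise_cons.mp hinc).1 e (by simp)
      have hinc' : List.Pairwise (· < ·) (e :: rest'.map Prod.fst) := (List.pairwise_cons.mp hinc).2
      have heM : ∀ y ∈ rest'.map Prod.fst, e < y := (List.pairwise_cons.mp hinc').1
      have hcf : chainFrom d ((e, ce) :: rest') =
          (decide (e = d + 1) && (decide (ce ≥ 2) || chainFrom e rest')) := rfl
      rw [hcf]
      by_cases hce : ce ≥ 2
      · -- the very next day is itself a duplicate: D = e, the interval (d, e) contains no key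
        have hdup : (((e, ce) :: rest').filter (fun p => decide (p.2 ≥ 2))).map Prod.fst =
            e :: (rest'.filter (fun p => decide (p.2 ≥ 2))).map Prod.fst := by
          rw [List.filter_cons_of_pos (by simpa using hce)]
          rfl
        rw [hdup]
        have hnil : (P ++ d :: ((e, ce) :: rest').map Prod.fst).filter
            (fun x => decide (d < x ∧ x < e)) = [] := by
          apply List.filter_eq_nil_iff.mpr
          intro x hx
          simp only [List.map_cons, List.mem_append, List.mem_cons] at hx
          rcases hx with hx | hx | hx | hx
          · have := hP x hx; simp; omega
          · subst hx; simp
          · subst hx; simp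
          · have := heM x hx; simp; omega
        simp only [hnil, List.length_nil, decide_eq_true hce, Bool.true_or, Bool.and_true]
        have hiff : (e = d + 1) ↔ ((0 : Int) = e - d - 1) := by omega
        simp [decide_eq_decide.mpr hiff]
      · -- the next day is a single: it must be d+1 and the chain continues from e
        have hdup : (((e, ce) :: rest').filter (fun p => decide (p.2 ≥ 2))).map Prod.fst =
            (rest'.filter (fun p => decide (p.2 ≥ 2))).map Prod.fst := by
          rw [List.filter_cons_of_neg (by simpa using hce)]
        rw [hdup, decide_eq_false hce, Bool.false_or]
        have hP' : ∀ x ∈ P ++ [d], x < e := by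
          intro x hx
          rcases List.mem_append.mp hx with hx | hx
          · exact lt_trans (hP x hx) hde
          · simp at hx; omega
        have hK : (P ++ [d]) ++ e :: rest'.map Prod.fst =
            P ++ d :: ((e, ce) :: rest').map Prod.fst := by simp
        have hrec := ih (P ++ [d]) e hP' hinc'
        cases hdups : (rest'.filter (fun p => decide (p.2 ≥ 2))).map Prod.fst with
        | nil =>
            rw [hdups] at hrec
            simp only [] at hrec
            rw [hrec]
            simp
        | cons D tl =>
            rw [hdups] at hrec
            simp only [] at hrec
            rw [hrec]
            simp only []
            -- D is a key of rest', hence e < D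
            have hDmem : D ∈ rest'.map Prod.fst := by
              have : D ∈ (rest'.filter (fun p => decide (p.2 ≥ 2))).map Prod.fst := by
                rw [hdups]; exact List.mem_cons_self
              obtain ⟨q, hq, hqD⟩ := List.mem_map.mp this
              exact List.mem_map.mpr ⟨q, List.mem_of_mem_filter hq, hqD⟩
            have heD : e < D := heM D hDmem
            -- interval filters as lists over the tail keys only
            have hfe : ((P ++ [d]) ++ e :: rest'.map Prod.fst).filter
                (fun x => decide (e < x ∧ x < D)) =
                (rest'.map Prod.fst).filter (fun x => decide (e < x ∧ x < D)) := by
              have h1 : ((P ++ [d]) ++ [e]) ++ rest'.map Prod.fst =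
                  (P ++ [d]) ++ e :: rest'.map Prod.fst := by simp
              rw [← h1]
              apply filter_interval_drop
              intro x hx
              rcases List.mem_append.mp hx with hx | hx
              · have := hP' x hx; omega
              · simp at hx; omega
            have hfd : (P ++ d :: ((e, ce) :: rest').map Prod.fst).filter
                (fun x => decide (d < x ∧ x < D)) =
                e :: (rest'.map Prod.fst).filter (fun x => decide (e < x ∧ x < D)) := by
              have h1 : (P ++ [d]) ++ e :: rest'.map Prod.fst =
                  P ++ d :: ((e, ce) :: rest').map Prod.fst := by simp
              rw [← h1]
              rw [filter_interval_drop (P ++ [d]) _ d D (by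
                intro x hx
                rcases List.mem_append.mp hx with hx | hx
                · have := hP x hx; omega
                · simp at hx; omega)]
              rw [List.filter_cons_of_pos (by simp; omega)]
              congr 1
              apply List.filter_congr
              intro x hx
              have := heM x hx
              have h2 : (d < x ∧ x < D) ↔ (e < x ∧ x < D) := by omega
              exact decide_eq_decide.mpr h2
            rw [hfe, hfd]
            -- the counting bound forces e = d + 1
            have hnodM : (rest'.map Prod.fst).Nodup := hinc'.of_cons.nodup
            have hbound := nodup_filter_interval_le (rest'.map Prod.fst) hnodM e D heD
            set c1 : Int :=
              (((rest'.map Prod.fst).filter (fun x => decide (e < x ∧ x < D))).length : Int)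
              with hc1
            have hlen : (((e :: (rest'.map Prod.fst).filter
                (fun x => decide (e < x ∧ x < D))).length : Int)) = c1 + 1 := by
              simp [hc1]
            rw [hlen]
            by_cases hA : e = d + 1 <;> by_cases hB : c1 = D - e - 1 <;>
              simp [hA, hB] <;> omega

lemma chain_zip (P : List Int) (items : List (Int × Int))
    (hinc : List.Pairwise (· < ·) (P ++ items.map Prod.fst)) :
    chainDup items =
      (((items.filter (fun p => decide (p.2 ≥ 2))).map Prod.fst).zip
        (((items.filter (fun p => decide (p.2 ≥ 2))).map Prod.fst).tail)).any
        (fun q => decide ((((P ++ items.map Prod.fst).filter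
            (fun x => decide (q.1 < x ∧ x < q.2))).length : Int) = q.2 - q.1 - 1)) := by
  induction items generalizing P with
  | nil => rfl
  | cons p rest ih =>
      obtain ⟨d, c⟩ := p
      have hassoc : P ++ ((d, c) :: rest).map Prod.fst = (P ++ [d]) ++ rest.map Prod.fst := by simp
      have hinc2 : List.Pairwise (· < ·) ((P ++ [d]) ++ rest.map Prod.fst) := by
        rw [← hassoc]; exact hinc
      have hP : ∀ x ∈ P, x < d := by
        intro x hx
        have := (List.pairwise_append.mp hinc).2.2 x hx d (by simp)
        exact this
      have hdM : List.Pairwise (· < ·) (d :: rest.map Prod.fst) := by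
        have := (List.pairwise_append.mp hinc).2.1
        simpa using this
      have hcd : chainDup ((d, c) :: rest) =
          ((decide (c ≥ 2) && chainFrom d rest) || chainDup rest) := rfl
      have hih := ih (P ++ [d]) hinc2
      rw [hcd]
      by_cases hc : c ≥ 2
      · have hdup : (((d, c) :: rest).filter (fun p => decide (p.2 ≥ 2))).map Prod.fst =
            d :: (rest.filter (fun p => decide (p.2 ≥ 2))).map Prod.fst := by
          rw [List.filter_cons_of_pos (by simpa using hc)]; rfl
        rw [hdup, decide_eq_true hc, Bool.true_and]
        have hcfp := chainFrom_pred P d rest hP hdM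
        cases hdups : (rest.filter (fun p => decide (p.2 ≥ 2))).map Prod.fst with
        | nil =>
            rw [hdups] at hcfp hih
            simp only [] at hcfp
            rw [hcfp, hih]
            simp
        | cons D tl =>
            rw [hdups] at hcfp hih
            simp only [] at hcfp
            rw [hcfp, hih, ← hassoc]
            rfl
      · have hdup : (((d, c) :: rest).filter (fun p => decide (p.2 ≥ 2))).map Prod.fst =
            (rest.filter (fun p => decide (p.2 ≥ 2))).map Prod.fst := by
          rw [List.filter_cons_of_neg (by simpa using hc)]
        rw [hdup, decide_eq_false hc, Bool.false_and, Bool.false_or, hih, ← hassoc]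

lemma map_fst_pair (f : Int → Int) : ∀ (l : List Int),
    List.map (Prod.fst ∘ fun k => (k, f k)) l = l := by
  intro l
  induction l with
  | nil => rfl
  | cons x t ih => simp [ih]

lemma pairLoop_any (K : List Int) : ∀ (ps : List (Int × Int)),
    pairLoop K ps =
      (if (ps.any (fun q => decide (((K.filter
            (fun x => decide (q.1 < x ∧ x < q.2))).length : Int) = q.2 - q.1 - 1))) = true
       then "Yes" else "No") := by
  intro ps
  induction ps with
  | nil => simp [pairLoop]
  | cons q rest ih =>
      obtain ⟨d1, d2⟩ := q
      have hcons : pairLoop K ((d1, d2) :: rest) =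
          (if ((K.filter (fun x => decide (d1 < x ∧ x < d2))).length : Int) = d2 - d1 - 1
           then "Yes" else pairLoop K rest) := rfl
      rw [hcons, ih, List.any_cons]
      by_cases h : ((K.filter (fun x => decide (d1 < x ∧ x < d2))).length : Int) = d2 - d1 - 1
      · rw [if_pos h, decide_eq_true h, Bool.true_or]
        simp
      · rw [if_neg h, decide_eq_false h, Bool.false_or]

-- strictly increasing distinct values of a sorted list
lemma ofList_sorted_pairwise : ∀ (n : Nat) (s : List Int), s.length ≤ n →
    List.Pairwise (· ≤ ·) s → List.Pairwise (· < ·) (PySem.Set.ofList s) := by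
  intro n
  induction n with
  | zero =>
      intro s hlen _
      have : s = [] := List.eq_nil_of_length_eq_zero (Nat.le_zero.mp hlen)
      subst this
      simp [PySem.Set.ofList]
  | succ n ih =>
      intro s hlen hsort
      match s with
      | [] => simp [PySem.Set.ofList]
      | x :: s' =>
        obtain ⟨m, rest, heq, hrsort, hgt⟩ := peel s' x hsort
        have hxrest : x ∉ rest := fun h => lt_irrefl x (hgt x h)
        have hofl : PySem.Set.ofList (x :: s') = x :: PySem.Set.ofList rest := by
          rw [heq]; exact ofList_replicate_append m x rest hxrest
        have hlen' : rest.length ≤ n := by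
          have := congrArg List.length heq
          simp [List.length_replicate] at this
          simp at hlen ⊢
          omega
        rw [hofl]
        refine List.pairwise_cons.mpr ⟨?_, ih rest hlen' hrsort⟩
        intro y hy
        exact hgt y ((PySem.Set.mem_ofList _ _).mp hy)

-- ===== VERDICT (by name: the statement is the Claim_ definition above) =====
theorem solve_spec : Claim_equal_solve := by
  intro a _ hpre
  unfold Spec_solve solve solve_alt
  set s := PySem.List.sorted a (fun x => x) with hs
  have hsort : List.Pairwise (· ≤ ·) s := PySem.List.sorted_pairwise a (fun x => x)
  have hperm : s.Perm a := PySem.List.sorted_perm a (fun x => x) false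
  have hlast : s.getLast? ≠ some (-1) := by
    intro h
    have hmem : (-1 : Int) ∈ s := List.mem_of_getLast? h
    obtain ⟨y, hy, hylt⟩ := hpre (hperm.mem_iff.mp hmem)
    have hys : y ∈ s := hperm.mem_iff.mpr hy
    have : y ≤ -1 := by
      rcases List.getLast?_eq_some_iff.mp h with ⟨l', hl'⟩
      rw [hl'] at hsort hys
      rcases List.mem_append.mp hys with hy' | hy'
      · exact (List.pairwise_append.mp hsort).2.2 y hy' (-1) (by simp)
      · simp at hy'; omega
    omega
  set items := (PySem.Set.ofList s).map (fun k => (k, (s.count k : Int))) with hitems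
  have hA : solveLoopA (s ++ [-1]) (-1) 1 false = scanItems items (-1) false :=
    main_loop s.length s le_rfl hsort hlast (-1) false (Or.inl rfl)
  have hit : (PySem.Dict.counter s).items = items := PySem.Dict.items_counter s
  have hvals : (PySem.Dict.counter s).values = items.map Prod.snd := by
    rw [← hit]; rfl
  have hkeys : (PySem.Dict.counter s).keys = items.map Prod.fst := by
    rw [PySem.Dict.keys_counter, hitems, List.map_map, map_fst_pair]
  have hofp : List.Pairwise (· < ·) (PySem.Set.ofList s) :=
    ofList_sorted_pairwise s.length s le_rfl hsort
  have hinc0 : List.Pairwise (· < ·) ([] ++ items.map Prod.fst) := by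
    rw [List.nil_append, hitems, List.map_map, map_fst_pair]
    exact hofp
  have hzip := chain_zip [] items hinc0
  rw [List.nil_append] at hzip
  show solveLoopA (s ++ [-1]) (-1) 1 false =
    (if ((List.foldl (fun d x => d.insert x (d.getD x 0 + 1))
          (PySem.Dict.empty : PySem.Dict Int Int) s).values.any
        (fun c => decide (c ≥ 4))) = true then "Yes"
     else pairLoop (List.foldl (fun d x => d.insert x (d.getD x 0 + 1))
            (PySem.Dict.empty : PySem.Dict Int Int) s).keys
       (((List.filter (fun p => decide (p.2 ≥ 2))
           (List.foldl (fun d x => d.insert x (d.getD x 0 + 1))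
             (PySem.Dict.empty : PySem.Dict Int Int) s).items).map
             Prod.fst).zip
        ((List.filter (fun p => decide (p.2 ≥ 2))
           (List.foldl (fun d x => d.insert x (d.getD x 0 + 1))
             (PySem.Dict.empty : PySem.Dict Int Int) s).items).map
             Prod.fst).tail))
  have hfold : List.foldl (fun d x => d.insert x (d.getD x 0 + 1))
      (PySem.Dict.empty : PySem.Dict Int Int) s
      = PySem.Dict.counter s := PySem.Dict.foldl_insert_getD_add_one_eq_counter s
  rw [hfold]
  rw [hA, scan_char, Bool.false_and, Bool.false_or, hvals, hit, hkeys, pairLoop_any,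
    ← hzip, List.any_map]
  have hany : (items.any (fun p => decide (p.2 ≥ 4)) : Bool) =
      (items.any ((fun c => decide (c ≥ 4)) ∘ Prod.snd) : Bool) := rfl
  rw [← hany]
  cases h4 : items.any (fun p => decide (p.2 ≥ 4)) <;> cases hcd : chainDup items <;>
    simp [any4, h4]
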